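-- pv_equiv track=rewrite | github.com/evandanderson/foobar | EnRouteSalute.py | solution
-- ===== SOURCE A (Python) =====
-- def solution(l):
--     total = 0
--     running_count = 0
--     for item in l:
--         if item == '>':
--             running_count += 1
--         elif item == '<' and running_count > 0:
--             total += running_count*2
--     return total
-- ===== SOURCE B (Python) =====
-- def solution(l):
--     total = 0
--     rest = list(l)
--     while rest:
--         item = rest.pop(0)
--         if item == '>':
--             total += 2 * rest.count('<')
--     return total
-- ===== Notes on version B (the rewrite author's own statement) =====
-- stated objective: alternative
-- what changed: Replaces the single accumulating pass (running count of '>' added per '<') with a nested pair count: pop each item off the front and, for each '>', add 2 times the number of '<' in the remaining suffix.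
import Mathlib
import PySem

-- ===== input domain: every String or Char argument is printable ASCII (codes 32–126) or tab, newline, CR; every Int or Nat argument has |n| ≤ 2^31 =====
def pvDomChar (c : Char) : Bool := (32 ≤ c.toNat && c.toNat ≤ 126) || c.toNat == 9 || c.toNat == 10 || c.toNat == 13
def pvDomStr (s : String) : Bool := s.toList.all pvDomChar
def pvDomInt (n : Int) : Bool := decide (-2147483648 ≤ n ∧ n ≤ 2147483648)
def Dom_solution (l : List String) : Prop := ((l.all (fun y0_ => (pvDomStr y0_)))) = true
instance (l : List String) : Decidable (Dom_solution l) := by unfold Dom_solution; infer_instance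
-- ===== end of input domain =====

-- B replaces A's single accumulating pass by a nested pair count (2 per '>' before a '<'); alternative decomposition, not faster.

-- ===== PORT A =====
-- A's for-loop over l carrying (total, running_count)
def solutionLoop : List String → Int → Int → Int
  | [], total, _ => total
  | item :: rest, total, rc =>
    if item = ">" then solutionLoop rest total (rc + 1)
    else if item = "<" ∧ rc > 0 then solutionLoop rest (total + rc * 2) rc
    else solutionLoop rest total rc

def solution (l : List String) : Int := solutionLoop l 0 0

-- ===== PORT B =====
-- B's while-loop: pop the front item; for '>' add 2 * rest.count('<')
def solutionAltLoop : List String → Int → Int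
  | [], total => total
  | item :: rest, total =>
    solutionAltLoop rest (if item = ">" then total + 2 * (PySem.List.count rest "<") else total)

def solution_alt (l : List String) : Int := solutionAltLoop l 0

-- ===== PRECONDITION & SPEC =====
def Spec_solution (l : List String) (out : Int) : Prop := out = solution_alt l
instance (l : List String) (out : Int) : Decidable (Spec_solution l out) := by unfold Spec_solution; infer_instance

-- ===== CLAIM (what is proved, stated in full; the proofs are below) =====
def Claim_equal_solution : Prop := ∀ (l : List String), Dom_solution l → Spec_solution l (solution l)

-- ===== LEMMAS AND PROOFS =====
theorem solutionAltLoop_shift (l : List String) (t c : Int) :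
    solutionAltLoop l (t + c) = solutionAltLoop l t + c := by
  induction l generalizing t with
  | nil => rfl
  | cons x xs ih =>
    simp only [solutionAltLoop]
    split_ifs with h
    · rw [show t + c + 2 * (PySem.List.count xs "<") = (t + 2 * (PySem.List.count xs "<")) + c by ring, ih]
    · exact ih t

theorem solutionLoop_eq (l : List String) (t r : Int) (hr : 0 ≤ r) :
    solutionLoop l t r = solutionAltLoop l t + 2 * r * (PySem.List.count l "<") := by
  induction l generalizing t r with
  | nil => simp [solutionLoop, solutionAltLoop, PySem.List.count]
  | cons x xs ih =>
    simp only [solutionLoop, solutionAltLoop]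
    have hcnt : (PySem.List.count (x :: xs) "<" : Int)
        = (if x = "<" then 1 else 0) + PySem.List.count xs "<" := by
      simp [PySem.List.count, List.count_cons]
      split_ifs with h <;> ring
    split_ifs with h1 h2
    · rw [ih t (r + 1) (by omega), hcnt]
      have hx : ¬ x = "<" := by rw [h1]; decide
      rw [solutionAltLoop_shift]
      simp [hx]; ring
    · rw [ih (t + r * 2) r hr, hcnt, solutionAltLoop_shift]
      simp [h2.1]
      ring
    · rw [ih t r hr, hcnt]
      by_cases hx : x = "<"
      · have hr0 : r = 0 := by
          rcases lt_or_eq_of_le hr with hlt | heq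
          · exact absurd ⟨hx, hlt⟩ h2
          · omega
        simp [hx, hr0]
      · simp [hx]

-- ===== VERDICT (by name: the statement is the Claim_ definition above) =====
theorem solution_spec : Claim_equal_solution := by
  intro l _
  unfold Spec_solution solution solution_alt
  rw [solutionLoop_eq l 0 0 le_rfl]
  ring
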